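-- pv_equiv track=rewrite | github.com/dawee/advent-of-code-2020 | day-16/resolve.py | filter_index_categories
-- ===== SOURCE A (Python) =====
-- def value_in_category_ranges(value, category_ranges):
--     return any((min_value <= value <= max_value for min_value, max_value in category_ranges))
--
-- def identify_possible_categories(values, categories_ranges):
--     return [
--         category_name
--         for category_name, category_ranges in categories_ranges.items()
--         if all((value_in_category_ranges(value, category_ranges) for value in values))
--     ]
--
-- def filter_index_categories(filtered_index_categories, unpicked_categories, all_values_by_index):
--     return {
--         index: (
--             filtered_index_categories[index]
--             if index in filtered_index_categories and len(filtered_index_categories[index]) == 1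
--             else identify_possible_categories(values, unpicked_categories)
--         )
--         for index, values in all_values_by_index.items()
--     }
-- ===== SOURCE B (Python) =====
-- def filter_index_categories(filtered_index_categories, unpicked_categories, all_values_by_index):
--     result = {}
--     for index, values in all_values_by_index.items():
--         known = filtered_index_categories.get(index)
--         if known is not None and len(known) == 1:
--             result[index] = known
--             continue
--         candidates = list(unpicked_categories.items())
--         for value in values:
--             candidates = [(name, ranges) for name, ranges in candidates
--                           if any(lo <= value <= hi for lo, hi in ranges)]
--         result[index] = [name for name, _ in candidates]
--     return result
-- ===== Notes on version B (the rewrite author's own statement) =====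
-- stated objective: alternative
-- what changed: Instead of testing every category against all values (category-major, via the any/all helper chain), B maintains a shrinking candidate list of categories and filters it once per value (value-major), emitting the surviving names in original order.
import Mathlib
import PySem

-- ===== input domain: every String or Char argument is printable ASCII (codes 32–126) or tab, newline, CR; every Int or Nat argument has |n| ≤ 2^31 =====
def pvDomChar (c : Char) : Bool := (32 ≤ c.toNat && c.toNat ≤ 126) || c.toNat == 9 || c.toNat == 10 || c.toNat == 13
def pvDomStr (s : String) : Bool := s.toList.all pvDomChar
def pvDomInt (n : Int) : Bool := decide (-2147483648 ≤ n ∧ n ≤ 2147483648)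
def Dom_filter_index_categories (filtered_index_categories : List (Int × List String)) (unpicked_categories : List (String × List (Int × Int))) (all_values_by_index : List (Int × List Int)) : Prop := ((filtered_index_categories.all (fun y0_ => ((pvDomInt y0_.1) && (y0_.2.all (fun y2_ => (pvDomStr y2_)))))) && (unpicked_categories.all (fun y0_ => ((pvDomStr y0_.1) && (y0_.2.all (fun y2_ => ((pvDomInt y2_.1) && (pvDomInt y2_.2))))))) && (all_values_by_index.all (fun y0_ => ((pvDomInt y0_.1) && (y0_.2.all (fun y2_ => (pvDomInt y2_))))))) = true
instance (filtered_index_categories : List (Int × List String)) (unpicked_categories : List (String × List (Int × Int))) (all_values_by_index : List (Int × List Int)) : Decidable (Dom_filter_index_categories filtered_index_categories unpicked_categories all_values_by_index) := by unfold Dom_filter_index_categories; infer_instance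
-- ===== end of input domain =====

-- ===== PORT A =====
def value_in_category_ranges (value : Int) (category_ranges : List (Int × Int)) : Bool :=
  category_ranges.any (fun r => decide (r.1 ≤ value) && decide (value ≤ r.2))

def identify_possible_categories (values : List Int) (categories_ranges : List (String × List (Int × Int))) : List String :=
  (categories_ranges.filter (fun c => values.all (fun value => value_in_category_ranges value c.2))).map (·.1)

def filter_index_categories (filtered_index_categories : List (Int × List String)) (unpicked_categories : List (String × List (Int × Int))) (all_values_by_index : List (Int × List Int)) : List (Int × List String) :=
  all_values_by_index.map (fun iv =>
    match (PySem.Dict.mk filtered_index_categories).get? iv.1 with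
    | some cats =>
        if cats.length == 1 then (iv.1, cats)
        else (iv.1, identify_possible_categories iv.2 unpicked_categories)
    | none => (iv.1, identify_possible_categories iv.2 unpicked_categories))

-- ===== PORT B =====
-- B: value-major — shrink a candidate list of categories once per value, then emit surviving names.
def filter_index_categories_alt (filtered_index_categories : List (Int × List String)) (unpicked_categories : List (String × List (Int × Int))) (all_values_by_index : List (Int × List Int)) : List (Int × List String) :=
  all_values_by_index.map (fun iv =>
    match (PySem.Dict.mk filtered_index_categories).get? iv.1 with
    | some known =>
        if known.length == 1 then (iv.1, known)
        else (iv.1,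
          ((iv.2.foldl
              (fun candidates value =>
                candidates.filter (fun c => c.2.any (fun r => decide (r.1 ≤ value) && decide (value ≤ r.2))))
              unpicked_categories).map (·.1)))
    | none => (iv.1,
          ((iv.2.foldl
              (fun candidates value =>
                candidates.filter (fun c => c.2.any (fun r => decide (r.1 ≤ value) && decide (value ≤ r.2))))
              unpicked_categories).map (·.1))))

-- ===== PRECONDITION & SPEC =====
def Spec_filter_index_categories (filtered_index_categories : List (Int × List String)) (unpicked_categories : List (String × List (Int × Int))) (all_values_by_index : List (Int × List Int)) (out : List (Int × List String)) : Prop := out = filter_index_categories_alt filtered_index_categories unpicked_categories all_values_by_index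
instance (filtered_index_categories : List (Int × List String)) (unpicked_categories : List (String × List (Int × Int))) (all_values_by_index : List (Int × List Int)) (out : List (Int × List String)) : Decidable (Spec_filter_index_categories filtered_index_categories unpicked_categories all_values_by_index out) := by unfold Spec_filter_index_categories; infer_instance

-- ===== CLAIM (what is proved, stated in full; the proofs are below) =====
def Claim_equal_filter_index_categories : Prop := ∀ (filtered_index_categories : List (Int × List String)) (unpicked_categories : List (String × List (Int × Int))) (all_values_by_index : List (Int × List Int)), Dom_filter_index_categories filtered_index_categories unpicked_categories all_values_by_index → Spec_filter_index_categories filtered_index_categories unpicked_categories all_values_by_index (filter_index_categories filtered_index_categories unpicked_categories all_values_by_index)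

-- ===== LEMMAS AND PROOFS =====


theorem foldl_filter_eq_filter_all {α : Type} (p : Int → α → Bool) (values : List Int) (cs : List α) :
    values.foldl (fun acc v => acc.filter (p v)) cs
      = cs.filter (fun c => values.all (fun v => p v c)) := by
  induction values generalizing cs with
  | nil => simp
  | cons v vs ih =>
      simp only [List.foldl_cons, ih, List.filter_filter, List.all_cons]
      exact List.filter_congr (fun c _ => by rw [Bool.and_comm])

-- ===== VERDICT (by name: the statement is the Claim_ definition above) =====
theorem filter_index_categories_spec : Claim_equal_filter_index_categories := by
  intro fic up avbi _
  unfold Spec_filter_index_categories filter_index_categories filter_index_categories_alt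
  apply List.map_congr_left
  intro iv _
  cases h : (PySem.Dict.mk fic).get? iv.1 with
  | none =>
      simp only [identify_possible_categories, value_in_category_ranges,
        foldl_filter_eq_filter_all, List.any_eq]
  | some cats =>
      by_cases h1 : cats.length == 1
      · simp [h1]
      · simp only [h1]
        simp only [identify_possible_categories, value_in_category_ranges,
          foldl_filter_eq_filter_all, List.any_eq]
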